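-- pv_equiv track=rewrite | github.com/metabrainz/picard | picard/util/__init__.py | sanitize_date
-- ===== SOURCE A (Python) =====
-- def sanitize_date(datestr):
--     """Sanitize date format.
--
--     e.g.: "1980-00-00" -> "1980"
--           "1980-  -  " -> "1980"
--           "1980-00-23" -> "1980-00-23"
--           ...
--     """
--     date = []
--     for num in reversed(datestr.split("-")):
--         try:
--             num = int(num.strip())
--         except ValueError:
--             if num == '':
--                 num = 0
--             else:
--                 break
--         if num or (num == 0 and date):
--             date.append(num)
--     date.reverse()
--     return ("", "%04d", "%04d-%02d", "%04d-%02d-%02d")[len(date)] % tuple(date)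
-- ===== SOURCE B (Python) =====
-- def sanitize_date(datestr):
--     """Sanitize date format (forward pass + trailing-zero trim)."""
--     nums = []
--     for tok in datestr.split('-'):
--         try:
--             nums.append(int(tok.strip()))
--         except ValueError:
--             if tok == '':
--                 nums.append(0)
--             else:
--                 nums = []
--     while nums and nums[-1] == 0:
--         nums.pop()
--     widths = (4, 2, 2)
--     return '-'.join(str(n).zfill(widths[i]) for i, n in enumerate(nums))
-- ===== Notes on version B (the rewrite author's own statement) =====
-- stated objective: alternative
-- what changed: A makes one reverse pass that breaks on the last invalid token and skips zeros while nothing has been collected, then indexes a tuple of %-format strings; B makes a forward pass that resets the accumulator on invalid tokens, trims trailing zeros in a separate loop, and formats by joining zfill'ed components with per-position widths.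
import Mathlib
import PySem

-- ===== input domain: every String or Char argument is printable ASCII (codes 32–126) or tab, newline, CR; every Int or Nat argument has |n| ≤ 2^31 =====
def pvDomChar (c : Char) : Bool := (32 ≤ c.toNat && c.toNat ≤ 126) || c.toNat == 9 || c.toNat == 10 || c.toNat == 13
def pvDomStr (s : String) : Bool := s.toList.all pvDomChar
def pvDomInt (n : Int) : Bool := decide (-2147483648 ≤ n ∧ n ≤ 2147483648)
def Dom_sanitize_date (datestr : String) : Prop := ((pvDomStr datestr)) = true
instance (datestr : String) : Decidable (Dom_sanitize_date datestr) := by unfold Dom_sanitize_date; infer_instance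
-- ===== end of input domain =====

-- B replaces A's single reverse loop (skip-zeros-while-empty + break) by a forward
-- accumulate-with-reset pass plus a separate trailing-zero trim and a join-based
-- formatter (objective: alternative decomposition, same cost).

-- ===== PORT A =====
-- A's reverse loop. try int(num.strip()) / except: num=0 if num=='' else break
-- is the orElse below; date.append is ++ [v]; break returns the list built so far.
def pvAGo : List String → List Int → List Int
  | [], date => date
  | num :: rest, date =>
    match (PySem.Int.ofStr? (PySem.Str.strip num)).orElse
        (fun _ => if num = "" then some 0 else none) with
    | none => date
    | some v =>
      if v ≠ 0 ∨ date ≠ [] then pvAGo rest (date ++ [v]) else pvAGo rest date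

-- '("","%04d","%04d-%02d","%04d-%02d-%02d")[len(date)] % tuple(date)':
-- '%0*d' % v is exactly str(v).zfill(w) for every int, ported as PySem.Str.zfill.
-- The len > 3 arm raises IndexError in Python (excluded by Pre_); "" here.
def pvAFmt (date : List Int) : String :=
  match date with
  | [] => ""
  | [a] => PySem.Str.zfill (PySem.Int.toStr a) 4
  | [a, b] => PySem.Str.zfill (PySem.Int.toStr a) 4 ++ "-" ++ PySem.Str.zfill (PySem.Int.toStr b) 2
  | [a, b, c] => PySem.Str.zfill (PySem.Int.toStr a) 4 ++ "-" ++ PySem.Str.zfill (PySem.Int.toStr b) 2 ++ "-" ++ PySem.Str.zfill (PySem.Int.toStr c) 2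
  | _ => ""

def sanitize_date (datestr : String) : String :=
  pvAFmt ((pvAGo ((PySem.Str.split? datestr "-").getD []).reverse []).reverse)

-- ===== PORT B =====
-- forward pass: append parsed int; on ValueError append 0 for '' else reset to [].
def pvBBuild : List String → List Int → List Int
  | [], nums => nums
  | tok :: rest, nums =>
    match PySem.Int.ofStr? (PySem.Str.strip tok) with
    | some v => pvBBuild rest (nums ++ [v])
    | none => if tok = "" then pvBBuild rest (nums ++ [0]) else pvBBuild rest []

-- while nums and nums[-1] == 0: nums.pop()
def pvBTrim (nums : List Int) : List Int :=
  if nums ≠ [] ∧ nums.getLast? = some (0 : Int) then pvBTrim nums.dropLast else nums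
termination_by nums.length
decreasing_by
  rename_i h
  have hne := h.1
  cases nums with
  | nil => simp at hne
  | cons x xs => simp

-- '-'.join(str(n).zfill(widths[i]) for i, n in enumerate(nums)); widths[i] for
-- i > 2 raises IndexError in Python (excluded by Pre_), pyGetD default here.
def sanitize_date_alt (datestr : String) : String :=
  let nums := pvBTrim (pvBBuild ((PySem.Str.split? datestr "-").getD []) [])
  PySem.Str.join "-"
    ((PySem.List.enumerate nums).map
      (fun p => PySem.Str.zfill (PySem.Int.toStr p.2) (PySem.List.pyGetD [4, 2, 2] p.1 0)))

-- ===== PRECONDITION & SPEC =====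
-- Per-token value: some v if int(tok.strip()) succeeds or tok == '' (then 0), none otherwise
def pvF (t : String) : Option Int :=
  (PySem.Int.ofStr? (PySem.Str.strip t)).orElse (fun _ => if t = "" then some 0 else none)

-- values of the tokens before the first invalid one
def pvP : List String → List Int
  | [] => []
  | t :: r => match pvF t with | none => [] | some v => v :: pvP r

-- Pre_ holds exactly where A returns normally: the date components A collects —
-- the values of the valid-token suffix of the '-'-split, minus leading zeros —
-- number at most 3.  On the excluded inputs A raises IndexError at the tuple
-- lookup (and B raises IndexError at widths[i] the same way); nothing else is excluded.
def Pre_sanitize_date (datestr : String) : Prop :=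
  ((pvP ((PySem.Str.split? datestr "-").getD []).reverse).dropWhile (fun v => v == 0)).length ≤ 3
instance (datestr : String) : Decidable (Pre_sanitize_date datestr) := by
  unfold Pre_sanitize_date; infer_instance

def pvWitness_sanitize_date : String := "1980-00-00"

def Spec_sanitize_date (datestr : String) (out : String) : Prop := out = sanitize_date_alt datestr
instance (datestr : String) (out : String) : Decidable (Spec_sanitize_date datestr out) := by unfold Spec_sanitize_date; infer_instance

-- ===== CLAIM (what is proved, stated in full; the proofs are below) =====
def Claim_equal_sanitize_date : Prop := ∀ (datestr : String), Dom_sanitize_date datestr → Pre_sanitize_date datestr → Spec_sanitize_date datestr (sanitize_date datestr)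

-- ===== LEMMAS AND PROOFS =====

theorem pvAGo_cons (t : String) (r : List String) (date : List Int) :
    pvAGo (t :: r) date =
      match pvF t with
      | none => date
      | some v => if v ≠ 0 ∨ date ≠ [] then pvAGo r (date ++ [v]) else pvAGo r date := by
  simp only [pvAGo, pvF, Option.orElse]

theorem pvBBuild_cons (t : String) (r : List String) (nums : List Int) :
    pvBBuild (t :: r) nums =
      match pvF t with
      | some v => pvBBuild r (nums ++ [v])
      | none => pvBBuild r [] := by
  simp only [pvBBuild, pvF, Option.orElse]
  cases PySem.Int.ofStr? (PySem.Str.strip t) with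
  | some v => rfl
  | none => by_cases h : t = "" <;> simp [h]

theorem pv_exists_none {l : List String} (h : ¬ ∀ t ∈ l, (pvF t).isSome) :
    ∃ t ∈ l, pvF t = none := by
  rcases not_forall.mp h with ⟨t, ht⟩
  rcases _root_.not_imp.mp ht with ⟨hmem, hn⟩
  exact ⟨t, hmem, Option.not_isSome_iff_eq_none.mp hn⟩

theorem pvP_append_of_none {l : List String} (l' : List String)
    (h : ∃ t ∈ l, pvF t = none) : pvP (l ++ l') = pvP l := by
  induction l with
  | nil => obtain ⟨t, ht, _⟩ := h; simp at ht
  | cons t r ih =>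
    obtain ⟨u, hu, hun⟩ := h
    cases hf : pvF t with
    | none => simp [pvP, hf]
    | some v =>
      have hur : u ∈ r := by
        rcases List.mem_cons.mp hu with rfl | hur
        · exact absurd hun (by simp [hf])
        · exact hur
      simp [pvP, hf, ih ⟨u, hur, hun⟩]

theorem pvP_append_of_all_some {l : List String} (l' : List String)
    (h : ∀ t ∈ l, (pvF t).isSome) : pvP (l ++ l') = pvP l ++ pvP l' := by
  induction l with
  | nil => simp [pvP]
  | cons t r ih =>
    cases hf : pvF t with
    | none => exact absurd (h t (by simp)) (by simp [hf])
    | some v => simp [pvP, hf, ih (fun u hu => h u (by simp [hu]))]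

theorem pvP_reverse_of_all_some {l : List String}
    (h : ∀ t ∈ l, (pvF t).isSome) : pvP l.reverse = (pvP l).reverse := by
  induction l with
  | nil => rfl
  | cons t r ih =>
    have hr : ∀ u ∈ r, (pvF u).isSome := fun u hu => h u (by simp [hu])
    cases hf : pvF t with
    | none => exact absurd (h t (by simp)) (by simp [hf])
    | some v =>
      rw [List.reverse_cons,
        pvP_append_of_all_some [t] (by intro u hu; rw [List.mem_reverse] at hu; exact hr u hu),
        ih hr]
      simp [pvP, hf]

theorem pvAGo_of_ne_nil (l : List String) (date : List Int) (h : date ≠ []) :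
    pvAGo l date = date ++ pvP l := by
  induction l generalizing date with
  | nil => simp [pvAGo, pvP]
  | cons t r ih =>
    cases hf : pvF t with
    | none => rw [pvAGo_cons, hf]; simp [pvP, hf]
    | some v =>
      rw [pvAGo_cons, hf]
      show (if v ≠ 0 ∨ date ≠ [] then pvAGo r (date ++ [v]) else pvAGo r date) = _
      rw [if_pos (Or.inr h)]
      simp [ih (date ++ [v]) (by simp), pvP, hf]

theorem pvAGo_nil (l : List String) :
    pvAGo l [] = (pvP l).dropWhile (fun v => v == 0) := by
  induction l with
  | nil => simp [pvAGo, pvP]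
  | cons t r ih =>
    cases hf : pvF t with
    | none => rw [pvAGo_cons, hf]; simp [pvP, hf]
    | some v =>
      rw [pvAGo_cons, hf]
      show (if v ≠ 0 ∨ ([] : List Int) ≠ [] then pvAGo r ([] ++ [v]) else pvAGo r []) = _
      by_cases hv : v = 0
      · subst hv
        rw [if_neg (by simp)]
        simp [pvP, hf, ih]
      · rw [if_pos (Or.inl hv), List.nil_append, pvAGo_of_ne_nil r [v] (by simp)]
        simp [pvP, hf, hv]

theorem pvBBuild_eq (l : List String) (nums : List Int) :
    pvBBuild l nums =
      if ∀ t ∈ l, (pvF t).isSome then nums ++ pvP l else (pvP l.reverse).reverse := by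
  induction l generalizing nums with
  | nil => simp [pvBBuild, pvP]
  | cons t r ih =>
    cases hf : pvF t with
    | some v =>
      rw [pvBBuild_cons, hf]
      show pvBBuild r (nums ++ [v]) = _
      rw [ih]
      by_cases hr : ∀ u ∈ r, (pvF u).isSome
      · have hall : ∀ u ∈ t :: r, (pvF u).isSome := by
          intro u hu
          rcases List.mem_cons.mp hu with rfl | h
          · simp [hf]
          · exact hr u h
        rw [if_pos hr, if_pos hall]
        simp [pvP, hf]
      · have hnot : ¬ ∀ u ∈ t :: r, (pvF u).isSome := by
          intro h; exact hr fun u hu => h u (by simp [hu])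
        rw [if_neg hr, if_neg hnot]
        obtain ⟨u, hu, hun⟩ := pv_exists_none hr
        rw [List.reverse_cons, pvP_append_of_none [t] ⟨u, by simpa using hu, hun⟩]
    | none =>
      rw [pvBBuild_cons, hf]
      show pvBBuild r [] = _
      rw [ih]
      have hnot : ¬ ∀ u ∈ t :: r, (pvF u).isSome := by
        intro h; exact absurd (h t (by simp)) (by simp [hf])
      rw [if_neg hnot]
      by_cases hr : ∀ u ∈ r, (pvF u).isSome
      · rw [if_pos hr, List.nil_append, List.reverse_cons,
          pvP_append_of_all_some [t] (by intro u hu; rw [List.mem_reverse] at hu; exact hr u hu)]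
        have h1 : pvP [t] = [] := by simp [pvP, hf]
        rw [h1, List.append_nil, pvP_reverse_of_all_some hr, List.reverse_reverse]
      · obtain ⟨u, hu, hun⟩ := pv_exists_none hr
        rw [if_neg hr, List.reverse_cons, pvP_append_of_none [t] ⟨u, by simpa using hu, hun⟩]

theorem pvBTrim_eq (nums : List Int) :
    pvBTrim nums = ((nums.reverse.dropWhile (fun v => v == 0))).reverse := by
  induction nums using List.reverseRecOn with
  | nil => simp [pvBTrim]
  | append_singleton xs x ih =>
    rw [pvBTrim]
    by_cases hx : x = 0
    · subst hx
      rw [if_pos ⟨by simp, by simp⟩, List.dropLast_concat, ih]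
      simp
    · rw [if_neg (by simp [hx]), List.reverse_append]
      simp [hx]

-- the two accumulations agree: A's reversed result = B's built-and-trimmed list
theorem pv_core (toks : List String) :
    (pvAGo toks.reverse []).reverse = pvBTrim (pvBBuild toks []) := by
  rw [pvAGo_nil, pvBBuild_eq]
  by_cases h : ∀ t ∈ toks, (pvF t).isSome
  · rw [if_pos h, List.nil_append, pvBTrim_eq, pvP_reverse_of_all_some h]
  · rw [if_neg h, pvBTrim_eq, List.reverse_reverse]

-- B's width lookups on lists of length ≤ 3, and the join, match A's format arms
theorem pv_format (nums : List Int) (h : nums.length ≤ 3) :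
    PySem.Str.join "-"
        ((PySem.List.enumerate nums).map
          (fun p => PySem.Str.zfill (PySem.Int.toStr p.2) (PySem.List.pyGetD [4, 2, 2] p.1 0))) =
      pvAFmt nums := by
  match nums, h with
  | [], _ => rfl
  | [a], _ =>
    apply String.toList_inj.mp
    simp [pvAFmt, PySem.List.enumerate, PySem.Str.toList_join, PySem.Chars.join_singleton,
      PySem.List.pyGetD]
  | [a, b], _ =>
    apply String.toList_inj.mp
    simp only [pvAFmt, PySem.List.enumerate, List.map, PySem.Str.toList_join,
      PySem.Chars.join_cons_cons, PySem.Chars.join_singleton, String.toList_append]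
    simp [PySem.List.pyGetD]
  | [a, b, c], _ =>
    apply String.toList_inj.mp
    simp only [pvAFmt, PySem.List.enumerate, List.map, PySem.Str.toList_join,
      PySem.Chars.join_cons_cons, PySem.Chars.join_singleton, String.toList_append]
    simp [PySem.List.pyGetD]

-- ===== VERDICT (by name: the statement is the Claim_ definition above) =====
theorem sanitize_date_spec : Claim_equal_sanitize_date := by
  intro datestr _ hpre
  unfold Pre_sanitize_date at hpre
  unfold Spec_sanitize_date sanitize_date sanitize_date_alt
  set toks := (PySem.Str.split? datestr "-").getD [] with htoks
  have hcore := pv_core toks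
  have hlen : (pvBTrim (pvBBuild toks [])).length ≤ 3 := by
    rw [← hcore, List.length_reverse, pvAGo_nil]
    exact hpre
  rw [pv_format _ hlen]
  exact congrArg pvAFmt hcore
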